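-- pv_equiv track=rewrite | github.com/MichaelAGoodrich/cs575-homework-1-fall-2025 | src/dendrogram_handler_v2.py | _get_binary_tree
-- ===== SOURCE A (Python) =====
-- from itertools import chain, combinations
-- from typing import Tuple, Union, Hashable, Set, Any # Used for type hints
--
-- Group = Set[Hashable]
--
-- def _get_binary_tree(
--                      treenode_group_dict: dict[int, Group]
--                      ) -> dict[int, list[int]]:
--     """ Create binary tree that shows which tree nodes of which other tree nodes.
--     Each tree node represents one of the subgroups found in the communities.
--     The root node is set of all agents.
--     The leaf nodes are sets of individual agents.
--     Return a binary tree of tree nodes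
--     """
--
--     # Initialize the dictionary containing the {node: empty children list} in the tree
--     binary_tree: dict[int, list[int]] = {tree_node: [] for tree_node in treenode_group_dict.keys()}
--
--     # For each possible way of partitioning a group into two subgroups
--     for node_1, node_2 in combinations(treenode_group_dict.keys(), 2):
--          # For each tree node and existing group
--         for parent_node, group in treenode_group_dict.items():
--             # If the subgroups form a partition, that is the two enumerated groups don't intersect AND
--             # If the group is made up from the two enumerated subgroups
--             if len(treenode_group_dict[node_1].intersection(treenode_group_dict[node_2])) == 0 and \
--                     group == treenode_group_dict[node_1].union(treenode_group_dict[node_2]):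
--                 # The left branch of the tree is the first subgroup in the partition
--                 binary_tree[parent_node].append(node_1)
--                 # The right branch of the tree is the second subgroup in the partiion
--                 binary_tree[parent_node].append(node_2)
--
--     return binary_tree
-- ===== SOURCE B (Python) =====
-- def _get_binary_tree(treenode_group_dict):
--     """Index the groups by frozenset once, then for each pair of nodes look the
--     pair's union up directly instead of rescanning every (node, group) item."""
--     binary_tree = {tree_node: [] for tree_node in treenode_group_dict.keys()}
--
--     # group (as a frozenset) -> nodes carrying exactly that group, in dict order
--     groups_by_set = {}
--     for node, group in treenode_group_dict.items():
--         key = frozenset(group)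
--         groups_by_set[key] = groups_by_set.get(key, []) + [node]
--
--     remaining = list(treenode_group_dict.keys())
--     while remaining:
--         node_1, remaining = remaining[0], remaining[1:]
--         group_1 = frozenset(treenode_group_dict[node_1])
--         for node_2 in remaining:
--             group_2 = frozenset(treenode_group_dict[node_2])
--             if group_1 & group_2:
--                 continue
--             for parent in groups_by_set.get(group_1 | group_2, []):
--                 binary_tree[parent].append(node_1)
--                 binary_tree[parent].append(node_2)
--     return binary_tree
-- ===== Notes on version B (the rewrite author's own statement) =====
-- stated objective: faster
-- what changed: Instead of rescanning every (node, group) item of the dict for every pair of nodes, B builds one dict indexing the nodes by the frozenset of their group and, for each disjoint pair, looks the pair's union up directly.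
import Mathlib
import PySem

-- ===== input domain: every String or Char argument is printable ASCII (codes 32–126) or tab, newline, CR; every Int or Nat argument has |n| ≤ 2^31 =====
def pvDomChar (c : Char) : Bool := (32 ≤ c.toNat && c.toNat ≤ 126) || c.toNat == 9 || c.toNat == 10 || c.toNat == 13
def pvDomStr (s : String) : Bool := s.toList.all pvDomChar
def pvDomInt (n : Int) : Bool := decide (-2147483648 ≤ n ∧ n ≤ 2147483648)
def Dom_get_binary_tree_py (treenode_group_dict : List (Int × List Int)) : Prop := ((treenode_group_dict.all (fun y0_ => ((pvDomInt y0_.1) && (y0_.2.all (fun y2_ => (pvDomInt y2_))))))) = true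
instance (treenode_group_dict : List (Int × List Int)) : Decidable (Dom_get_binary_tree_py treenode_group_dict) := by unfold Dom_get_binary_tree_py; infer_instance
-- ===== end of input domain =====

-- B replaces A's rescan of every (node, group) item for every node pair by a dict that
-- indexes the groups by frozenset once, looked up at the pair's union (objective: faster).

-- ===== PORT A =====
-- The dict parameter arrives as an association list; PySem.Dict.ofList rebuilds the Python
-- dict exactly as dict construction does (later value wins, first position kept).
-- Group values are Python sets, given as their distinct-element lists; set operations go
-- through PySem.Set (ofList/inter/union/equal/len).

-- 'len(d[n1] & d[n2]) == 0 and group == d[n1] | d[n2]' (d[n] with n drawn from d.keys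
-- always hits, so the total getD with default [] is exact here)
def pvCondA (d : PySem.Dict Int (List Int)) (node_1 node_2 : Int) (group : List Int) : Bool :=
  (PySem.Set.len (PySem.Set.inter (PySem.Set.ofList (d.getD node_1 []))
      (d.getD node_2 [])) == 0)
  && PySem.Set.equal (PySem.Set.ofList group)
      (PySem.Set.union (PySem.Set.ofList (d.getD node_1 [])) (d.getD node_2 []))

-- 'for parent_node, group in treenode_group_dict.items(): if …: append(node_1); append(node_2)'
def pvInnerA (d : PySem.Dict Int (List Int)) (node_1 node_2 : Int)
    (bt : PySem.Dict Int (List Int)) : PySem.Dict Int (List Int) :=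
  d.items.foldl (fun bt pg =>
    if pvCondA d node_1 node_2 pg.2 then
      (bt.modify pg.1 [] (· ++ [node_1])).modify pg.1 [] (· ++ [node_2])
    else bt) bt

def get_binary_tree_py (treenode_group_dict : List (Int × List Int)) : List (Int × List Int) :=
  let d : PySem.Dict Int (List Int) := PySem.Dict.ofList treenode_group_dict
  -- binary_tree = {tree_node: [] for tree_node in treenode_group_dict.keys()}
  let bt0 : PySem.Dict Int (List Int) :=
    d.keys.foldl (fun bt k => bt.insert k ([] : List Int)) PySem.Dict.empty
  -- for node_1, node_2 in combinations(treenode_group_dict.keys(), 2): …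
  let bt :=
    (PySem.List.combinations d.keys 2).foldl (fun bt c =>
      match c with
      | [node_1, node_2] => pvInnerA d node_1 node_2 bt
      | _ => bt) bt0
  bt.items

-- ===== PORT B =====
-- frozenset(g) is represented canonically by its elements sorted increasingly
-- (two frozensets of ints are equal iff these lists are equal)
def pvCanon (g : List Int) : List Int :=
  PySem.List.sorted (PySem.Set.ofList g) (fun x => x) false

-- body of B's inner 'for node_2 in remaining:' loop
def pvPairStep (d : PySem.Dict Int (List Int)) (idx : PySem.Dict (List Int) (List Int))
    (bt : PySem.Dict Int (List Int)) (node_1 node_2 : Int) : PySem.Dict Int (List Int) :=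
  let group_1 := pvCanon (d.getD node_1 [])
  let group_2 := pvCanon (d.getD node_2 [])
  -- 'if group_1 & group_2: continue'
  if (PySem.Set.inter group_1 group_2).isEmpty then
    -- 'for parent in groups_by_set.get(group_1 | group_2, []): append; append'
    (idx.getD (pvCanon (group_1 ++ group_2)) []).foldl
      (fun bt parent => (bt.modify parent [] (· ++ [node_1])).modify parent [] (· ++ [node_2]))
      bt
  else bt

-- 'while remaining: node_1, remaining = remaining[0], remaining[1:]; for node_2 in remaining: …'
def pvPairLoop (d : PySem.Dict Int (List Int)) (idx : PySem.Dict (List Int) (List Int)) :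
    List Int → PySem.Dict Int (List Int) → PySem.Dict Int (List Int)
  | [], bt => bt
  | node_1 :: remaining, bt =>
      pvPairLoop d idx remaining
        (remaining.foldl (fun bt node_2 => pvPairStep d idx bt node_1 node_2) bt)

def get_binary_tree_py_alt (treenode_group_dict : List (Int × List Int)) : List (Int × List Int) :=
  let d : PySem.Dict Int (List Int) := PySem.Dict.ofList treenode_group_dict
  let bt0 : PySem.Dict Int (List Int) :=
    d.keys.foldl (fun bt k => bt.insert k ([] : List Int)) PySem.Dict.empty
  -- groups_by_set[key] = groups_by_set.get(key, []) + [node], keyed by frozenset(group)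
  let idx : PySem.Dict (List Int) (List Int) :=
    d.items.foldl (fun idx pg => idx.modify (pvCanon pg.2) [] (· ++ [pg.1])) PySem.Dict.empty
  (pvPairLoop d idx d.keys bt0).items

-- ===== PRECONDITION & SPEC =====
def Spec_get_binary_tree_py (treenode_group_dict : List (Int × List Int)) (out : List (Int × List Int)) : Prop := out = get_binary_tree_py_alt treenode_group_dict
instance (treenode_group_dict : List (Int × List Int)) (out : List (Int × List Int)) : Decidable (Spec_get_binary_tree_py treenode_group_dict out) := by unfold Spec_get_binary_tree_py; infer_instance

-- ===== CLAIM (what is proved, stated in full; the proofs are below) =====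
def Claim_equal_get_binary_tree_py : Prop := ∀ (treenode_group_dict : List (Int × List Int)), Dom_get_binary_tree_py treenode_group_dict → Spec_get_binary_tree_py treenode_group_dict (get_binary_tree_py treenode_group_dict)

-- ===== LEMMAS AND PROOFS =====

-- membership is unchanged by canonicalisation
theorem pv_mem_canon (a : Int) (x : List Int) : a ∈ pvCanon x ↔ a ∈ x := by
  unfold pvCanon; rw [PySem.List.mem_sorted, PySem.Set.mem_ofList]

theorem pv_canon_lt (x : List Int) : (pvCanon x).Pairwise (· < ·) := by
  unfold pvCanon; exact PySem.List.sorted_ofList_pairwise_lt x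

-- two lists have the same canonical frozenset representation iff they have the same members
theorem pv_canon_eq_iff (x y : List Int) : pvCanon x = pvCanon y ↔ ∀ a : Int, a ∈ x ↔ a ∈ y := by
  constructor
  · intro h a
    rw [← pv_mem_canon a x, ← pv_mem_canon a y, h]
  · intro h
    have hx := pv_canon_lt x
    have hy := pv_canon_lt y
    have hmem : ∀ a : Int, a ∈ pvCanon x ↔ a ∈ pvCanon y := by
      intro a; rw [pv_mem_canon, pv_mem_canon]; exact h a
    have hperm : (pvCanon x).Perm (pvCanon y) :=
      (List.perm_ext_iff_of_nodup (hx.imp ne_of_lt) (hy.imp ne_of_lt)).2 hmem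
    have h1 : PySem.List.sorted (pvCanon y) (fun x => x) = pvCanon x :=
      PySem.List.sorted_eq_of_perm_of_pairwise_lt _ _ _ hperm hx
    have h2 : PySem.List.sorted (pvCanon y) (fun x => x) = pvCanon y :=
      PySem.List.sorted_eq_self_of_pairwise _ _ (hy.imp le_of_lt)
    rw [← h1, h2]

-- A's disjointness test equals B's
theorem pv_disjoint_eq (a b : List Int) :
    (PySem.Set.len (PySem.Set.inter (PySem.Set.ofList a) b) == 0)
      = (PySem.Set.inter (pvCanon a) (pvCanon b)).isEmpty := by
  rw [Bool.eq_iff_iff]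
  simp only [List.isEmpty_iff, beq_iff_eq, List.eq_nil_iff_forall_not_mem,
    PySem.Set.mem_inter, pv_mem_canon, PySem.Set.len]
  rw [Int.natCast_eq_zero, List.length_eq_zero_iff, List.eq_nil_iff_forall_not_mem]
  simp only [PySem.Set.mem_inter, PySem.Set.mem_ofList]

-- A's 'group == union' test equals B's canonical-key comparison
theorem pv_equal_eq (g a b : List Int) :
    PySem.Set.equal (PySem.Set.ofList g)
        (PySem.Set.union (PySem.Set.ofList a) b)
      = (pvCanon g == pvCanon (pvCanon a ++ pvCanon b)) := by
  rw [Bool.eq_iff_iff, PySem.Set.equal_iff, beq_iff_eq, pv_canon_eq_iff]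
  constructor
  · intro h x
    have := h x
    simp only [PySem.Set.mem_ofList, PySem.Set.mem_union, List.mem_append, pv_mem_canon] at this ⊢
    exact this
  · intro h x
    have := h x
    simp only [PySem.Set.mem_ofList, PySem.Set.mem_union, List.mem_append, pv_mem_canon] at this ⊢
    exact this

-- looking B's index up at k yields exactly the nodes whose group canonicalises to k, in order
theorem pv_idx_lookup (items : List (Int × List Int)) (k : List Int) :
    (items.foldl (fun idx pg => idx.modify (pvCanon pg.2) [] (· ++ [pg.1]))
        PySem.Dict.empty).getD k []
      = (items.filter (fun pg => pvCanon pg.2 == k)).map (·.1) := by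
  have h := PySem.Dict.getD_foldl_modify_append
    (l := items.map (fun pg => (pvCanon pg.2, pg.1)))
    (d := (PySem.Dict.empty : PySem.Dict (List Int) (List Int))) (c := k)
  rw [List.foldl_map] at h
  rw [h, PySem.Dict.getD_empty, List.nil_append, List.filter_map, List.map_map]
  rfl

-- per pair, A's rescan of all items equals B's index lookup
theorem pv_step_eq (d : PySem.Dict Int (List Int)) (bt : PySem.Dict Int (List Int))
    (n1 n2 : Int) :
    pvInnerA d n1 n2 bt
      = pvPairStep d
          (d.items.foldl (fun idx pg => idx.modify (pvCanon pg.2) [] (· ++ [pg.1]))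
            PySem.Dict.empty) bt n1 n2 := by
  unfold pvInnerA pvPairStep
  simp only [pv_idx_lookup]
  by_cases hd : (PySem.Set.inter (pvCanon (d.getD n1 [])) (pvCanon (d.getD n2 []))).isEmpty = true
  · rw [if_pos hd]
    have hc : ∀ g : List Int, pvCondA d n1 n2 g
        = (pvCanon g == pvCanon (pvCanon (d.getD n1 []) ++ pvCanon (d.getD n2 []))) := by
      intro g
      unfold pvCondA
      rw [pv_disjoint_eq, pv_equal_eq, hd, Bool.true_and]
    simp only [hc]
    rw [List.foldl_map, List.foldl_filter]
  · rw [if_neg hd]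
    have hc : ∀ g : List Int, pvCondA d n1 n2 g = false := by
      intro g
      unfold pvCondA
      rw [pv_disjoint_eq, Bool.eq_false_iff.mpr hd, Bool.false_and]
    simp only [hc, Bool.false_eq_true, if_false]
    exact List.foldl_fixed _

-- A's fold over combinations(keys, 2) equals B's suffix-pair loop
theorem pv_loop_eq (d : PySem.Dict Int (List Int)) (keys : List Int)
    (bt : PySem.Dict Int (List Int)) :
    (PySem.List.combinations keys 2).foldl (fun bt c =>
        match c with
        | [node_1, node_2] => pvInnerA d node_1 node_2 bt
        | _ => bt) bt
      = pvPairLoop d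
          (d.items.foldl (fun idx pg => idx.modify (pvCanon pg.2) [] (· ++ [pg.1]))
            PySem.Dict.empty) keys bt := by
  induction keys generalizing bt with
  | nil => rw [PySem.List.combinations_nil_succ]; rfl
  | cons k ks ih =>
      rw [show (2 : Nat) = 1 + 1 from rfl, PySem.List.combinations_cons_succ,
        PySem.List.combinations_one, List.foldl_append, List.map_map, List.foldl_map]
      rw [pvPairLoop]
      rw [← ih]
      congr 1
      exact List.foldl_ext _ _ bt (fun acc x _ => pv_step_eq d acc k x)

-- ===== VERDICT (by name: the statement is the Claim_ definition above) =====
theorem get_binary_tree_py_spec : Claim_equal_get_binary_tree_py := by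
  intro d _
  unfold Spec_get_binary_tree_py get_binary_tree_py get_binary_tree_py_alt
  simp only []   -- zeta-reduce the ports' 'let' bindings
  rw [pv_loop_eq]
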